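-- pv_equiv track=rewrite | github.com/MrBrantCode/unitest_baseline | mut_generate/mist_train_cf/cf_4846/solution.py | count_unique_odd_subsets
-- ===== SOURCE A (Python) =====
-- def count_unique_odd_subsets(nums):
--     # Sort the given set in non-decreasing order
--     nums = sorted(set(nums))
--
--     def generate_subsets(index, subset, subsets):
--         if index == len(nums):
--             subsets.append(subset)
--         else:
--             generate_subsets(index + 1, subset, subsets)
--             generate_subsets(index + 1, subset + [nums[index]], subsets)
--
--     # Generate all subsets
--     subsets = []
--     generate_subsets(0, [], subsets)
--
--     # Filter out the subsets that do not contain at least one odd number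
--     odd_subsets = [subset for subset in subsets if any(num % 2 != 0 for num in subset)]
--
--     # Find the number of unique subsets by removing duplicates from the filtered subsets
--     unique_subsets = set(tuple(subset) for subset in odd_subsets)
--
--     return len(unique_subsets)
-- ===== SOURCE B (Python) =====
-- def count_unique_odd_subsets(nums):
--     # Closed form: every subset of the distinct elements is unique; subtract
--     # the all-even subsets: 2^d - 2^e (d distinct elements, e distinct evens).
--     s = set(nums)
--     e = sum(1 for x in s if x % 2 == 0)
--     return 2 ** len(s) - 2 ** e
-- ===== Notes on version B (the rewrite author's own statement) =====
-- stated objective: faster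
-- what changed: Replaces the exponential generate-all-subsets recursion, filter and tuple-dedup with the closed form 2^d - 2^e over the distinct elements (d) and distinct even elements (e).
import Mathlib
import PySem

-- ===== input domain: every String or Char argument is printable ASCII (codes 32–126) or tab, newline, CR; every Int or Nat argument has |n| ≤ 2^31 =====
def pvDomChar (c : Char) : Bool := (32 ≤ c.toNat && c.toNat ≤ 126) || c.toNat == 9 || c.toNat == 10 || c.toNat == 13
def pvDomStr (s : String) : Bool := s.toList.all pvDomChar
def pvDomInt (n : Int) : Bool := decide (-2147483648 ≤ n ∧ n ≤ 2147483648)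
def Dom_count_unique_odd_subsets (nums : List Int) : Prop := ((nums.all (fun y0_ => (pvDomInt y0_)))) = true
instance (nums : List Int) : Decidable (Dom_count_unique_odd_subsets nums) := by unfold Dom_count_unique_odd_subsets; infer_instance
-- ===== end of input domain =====

-- B replaces A's exponential subset enumeration + filter + tuple-dedup by the
-- closed form 2^d - 2^e over the distinct elements (d) and distinct evens (e): faster.


-- ===== PORT A =====
-- generate_subsets(index, subset, subsets): Python recurses on the index into
-- nums; ported as the same recursion on the remaining suffix of nums.
def genSubsets (rest : List Int) (subset : List Int) (subsets : List (List Int)) :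
    List (List Int) :=
  match rest with
  | [] => subsets ++ [subset]
  | x :: xs => genSubsets xs (subset ++ [x]) (genSubsets xs subset subsets)

def count_unique_odd_subsets (nums : List Int) : Int :=
  let nums' := PySem.List.sorted (PySem.Set.ofList nums) (fun x => x) false
  let subsets := genSubsets nums' [] []
  let odd_subsets := subsets.filter (fun s => s.any (fun n => PySem.Int.mod n 2 != 0))
  ((PySem.Set.ofList odd_subsets).length : Int)

-- ===== PORT B =====
def count_unique_odd_subsets_alt (nums : List Int) : Int :=
  let s := PySem.Set.ofList nums
  let e := (s.filter (fun x => PySem.Int.mod x 2 == 0)).length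
  (2 : Int) ^ s.length - (2 : Int) ^ e

-- ===== PRECONDITION & SPEC =====
def Spec_count_unique_odd_subsets (nums : List Int) (out : Int) : Prop := out = count_unique_odd_subsets_alt nums
instance (nums : List Int) (out : Int) : Decidable (Spec_count_unique_odd_subsets nums out) := by unfold Spec_count_unique_odd_subsets; infer_instance

-- ===== CLAIM (what is proved, stated in full; the proofs are below) =====
def Claim_equal_count_unique_odd_subsets : Prop := ∀ (nums : List Int), Dom_count_unique_odd_subsets nums → Spec_count_unique_odd_subsets nums (count_unique_odd_subsets nums)

-- ===== LEMMAS AND PROOFS =====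

/-- The list of subsets A's recursion produces, in A's order. -/
def allSubs : List Int → List (List Int)
  | [] => [[]]
  | x :: xs => allSubs xs ++ (allSubs xs).map (x :: ·)

theorem gen_eq (rest : List Int) : ∀ subset acc,
    genSubsets rest subset acc = acc ++ (allSubs rest).map (subset ++ ·) := by
  induction rest with
  | nil => intro subset acc; simp [genSubsets, allSubs]
  | cons x xs ih =>
      intro subset acc
      simp [genSubsets, allSubs, ih, List.map_map, Function.comp_def,
        List.append_assoc]

theorem mem_allSubs_sub {l s : List Int} (hs : s ∈ allSubs l) : ∀ y ∈ s, y ∈ l := by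
  induction l generalizing s with
  | nil => simp [allSubs] at hs; simp [hs]
  | cons x xs ih =>
      simp only [allSubs, List.mem_append, List.mem_map] at hs
      rcases hs with h | ⟨t, ht, rfl⟩
      · intro y hy; exact List.mem_cons_of_mem _ (ih h y hy)
      · intro y hy
        rcases List.mem_cons.1 hy with rfl | hy
        · exact List.mem_cons_self
        · exact List.mem_cons_of_mem _ (ih ht y hy)

theorem nodup_allSubs {l : List Int} (h : l.Nodup) : (allSubs l).Nodup := by
  induction l with
  | nil => simp [allSubs]
  | cons x xs ih =>
      rcases List.nodup_cons.1 h with ⟨hx, hxs⟩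
      have h1 := ih hxs
      refine List.Nodup.append h1 (h1.map (fun a b hab => by simpa using hab)) ?_
      intro s hs1 hs2
      rcases List.mem_map.1 hs2 with ⟨t, _, rfl⟩
      exact hx (mem_allSubs_sub hs1 x List.mem_cons_self)

theorem length_allSubs (l : List Int) : (allSubs l).length = 2 ^ l.length := by
  induction l with
  | nil => simp [allSubs]
  | cons x xs ih => simp [allSubs, ih]; ring

/-- Parity test, in Lean's emod form (= PySem.Int.mod with positive divisor 2). -/
def evenb (n : Int) : Bool := n % 2 == 0

theorem evenb_eq_port (n : Int) : (PySem.Int.mod n 2 == 0) = evenb n := by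
  rw [PySem.Int.mod_eq_emod_of_pos (by norm_num : (0:Int) < 2)]; rfl

/-- Number of all-even subsets = 2 ^ (number of even elements). -/
theorem length_filter_allEven (l : List Int) :
    ((allSubs l).filter (fun s => s.all evenb)).length
      = 2 ^ (l.filter evenb).length := by
  induction l with
  | nil => simp [allSubs]
  | cons x xs ih =>
      simp only [allSubs, List.filter_append, List.length_append, List.filter_map,
        Function.comp_def, List.all_cons, List.filter_cons]
      by_cases hx : evenb x
      · simp only [hx, Bool.true_and, if_pos, List.length_map, ih,
          List.length_cons, pow_succ]
        ring
      · simp only [hx, Bool.false_and]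
        simpa using ih

/-- A's count over a duplicate-free list l equals 2^|l| - 2^|evens of l|. -/
theorem countA_closed (l : List Int) (hl : l.Nodup) :
    ((PySem.Set.ofList ((genSubsets l [] []).filter
        (fun s => s.any (fun n => PySem.Int.mod n 2 != 0)))).length : Int)
      = (2 : Int) ^ l.length
          - (2 : Int) ^ (l.filter (fun n => PySem.Int.mod n 2 == 0)).length := by
  have hgen : genSubsets l [] [] = allSubs l := by
    simpa using gen_eq l [] []
  rw [hgen]
  have hpred : (fun n : Int => PySem.Int.mod n 2 != 0) = fun n => !(evenb n) := by
    funext n; rw [bne, evenb_eq_port]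
  have hpred2 : (fun n : Int => PySem.Int.mod n 2 == 0) = evenb := by
    funext n; rw [evenb_eq_port]
  rw [hpred, hpred2]
  set p : List Int → Bool := fun s => s.any (fun n => !(evenb n)) with hp
  have hnodup : ((allSubs l).filter p).Nodup := (nodup_allSubs hl).filter p
  rw [PySem.Set.ofList_eq_self_of_nodup _ hnodup]
  have htot : ((allSubs l).filter p).length
      = 2 ^ l.length - 2 ^ (l.filter evenb).length := by
    have h := List.length_eq_length_filter_add p (l := allSubs l)
    have hnot : (fun s : List Int => !(p s)) = fun s => s.all evenb := by
      funext s; simp [hp, List.all_eq_not_any_not]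
    rw [length_allSubs, hnot, length_filter_allEven] at h
    omega
  rw [htot]
  have hle : (l.filter evenb).length ≤ l.length := List.length_filter_le _ _
  have hple : 2 ^ (l.filter evenb).length ≤ 2 ^ l.length :=
    Nat.pow_le_pow_right (by norm_num) hle
  push_cast [Nat.cast_sub hple]
  ring

-- ===== VERDICT (by name: the statement is the Claim_ definition above) =====
theorem count_unique_odd_subsets_spec : Claim_equal_count_unique_odd_subsets := by
  intro nums _
  unfold Spec_count_unique_odd_subsets count_unique_odd_subsets count_unique_odd_subsets_alt
  set s := PySem.Set.ofList nums with hs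
  set l := PySem.List.sorted s (fun x => x) false with hl
  have hperm : l.Perm s := PySem.List.sorted_perm ..
  have hlnodup : l.Nodup := hperm.symm.nodup (PySem.Set.nodup_ofList nums)
  have := countA_closed l hlnodup
  simp only [this]
  rw [hperm.length_eq, (hperm.filter _).length_eq]
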